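-- pv_equiv track=rewrite | github.com/mehryar-m/AoC2020 | day6/day6.py | soln1
-- ===== SOURCE A (Python) =====
-- def soln1(surveys):
--     count = 0
--     survey = set()
--     for s in surveys:
--         if s == "":
--             count += len(survey)
--             survey = set()
--         else:
--             [survey.add(answer) for answer in s]
--     count += len(survey)
--     return count
-- ===== SOURCE B (Python) =====
-- def soln1(surveys):
--     total = 0
--     rest = surveys
--     while "" in rest:
--         i = rest.index("")
--         total += len(set("".join(rest[:i])))
--         rest = rest[i + 1:]
--     return total + len(set("".join(rest)))
-- ===== Notes on version B (the rewrite author's own statement) =====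
-- stated objective: alternative
-- what changed: B replaces A's element-wise loop threading a running set flushed at each blank line by a group-at-a-time loop that locates each separator with list.index and adds len(set(''.join(group))) per group.
import Mathlib
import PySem

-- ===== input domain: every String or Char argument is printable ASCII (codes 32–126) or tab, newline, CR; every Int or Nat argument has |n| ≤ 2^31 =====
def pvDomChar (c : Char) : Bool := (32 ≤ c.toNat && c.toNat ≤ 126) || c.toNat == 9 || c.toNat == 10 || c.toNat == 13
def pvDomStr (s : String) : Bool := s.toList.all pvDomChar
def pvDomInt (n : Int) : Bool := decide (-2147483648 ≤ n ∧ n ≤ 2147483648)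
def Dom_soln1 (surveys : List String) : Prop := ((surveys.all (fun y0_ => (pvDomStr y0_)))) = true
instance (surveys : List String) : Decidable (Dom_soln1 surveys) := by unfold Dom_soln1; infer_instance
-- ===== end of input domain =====

-- B replaces A's element-wise loop with a running set (flushed at each "") by a
-- group-at-a-time loop that locates each separator with .index and counts
-- len(set("".join(group))) per group; objective: alternative decomposition.

-- ===== PORT A =====
def soln1 (surveys : List String) : Int :=
  let p : Int × PySem.Set Char := surveys.foldl
    (fun st s =>
      if s = "" then (st.1 + (st.2.length : Int), PySem.Set.empty)
      else (st.1, s.toList.foldl (fun sv c => PySem.Set.add sv c) st.2))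
    (0, PySem.Set.empty)
  p.1 + (p.2.length : Int)

-- ===== PORT B =====
-- the while loop of Source B: state (total, rest)
def soln1AltGo (total : Int) (rest : List String) : Int :=
  if h : ("" : String) ∈ rest then
    let i := rest.idxOf ""
    soln1AltGo
      (total + ((PySem.Set.ofList ((rest.take i).flatMap String.toList)).length : Int))
      (rest.drop (i + 1))
  else
    total + ((PySem.Set.ofList (rest.flatMap String.toList)).length : Int)
termination_by rest.length
decreasing_by
  have := List.idxOf_lt_length_of_mem h
  simp [List.length_drop]
  omega

def soln1_alt (surveys : List String) : Int := soln1AltGo 0 surveys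

-- ===== PRECONDITION & SPEC =====
def Spec_soln1 (surveys : List String) (out : Int) : Prop := out = soln1_alt surveys
instance (surveys : List String) (out : Int) : Decidable (Spec_soln1 surveys out) := by unfold Spec_soln1; infer_instance

-- ===== CLAIM (what is proved, stated in full; the proofs are below) =====
def Claim_equal_soln1 : Prop := ∀ (surveys : List String), Dom_soln1 surveys → Spec_soln1 surveys (soln1 surveys)

-- ===== LEMMAS AND PROOFS =====

-- reference function: distinct-answer count of the remaining groups, with acc the
-- chars of the current (partial) group
def gcount (acc : List Char) : List String → Int
  | [] => ((PySem.Set.ofList acc).length : Int)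
  | s :: rest =>
      if s = "" then ((PySem.Set.ofList acc).length : Int) + gcount [] rest
      else gcount (acc ++ s.toList) rest

lemma foldl_add_eq_ofList_append (cs : List Char) (acc : List Char) :
    cs.foldl (fun sv c => PySem.Set.add sv c) (PySem.Set.ofList acc)
      = PySem.Set.ofList (acc ++ cs) := by
  rw [PySem.Set.ofList_append, PySem.Set.update]

lemma foldA (l : List String) (c : Int) (acc : List Char) :
    (l.foldl
      (fun st s =>
        if s = "" then (st.1 + (st.2.length : Int), PySem.Set.empty)
        else (st.1, s.toList.foldl (fun sv ch => PySem.Set.add sv ch) st.2))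
      (c, PySem.Set.ofList acc)).1
    + ((l.foldl
      (fun st s =>
        if s = "" then (st.1 + (st.2.length : Int), PySem.Set.empty)
        else (st.1, s.toList.foldl (fun sv ch => PySem.Set.add sv ch) st.2))
      (c, PySem.Set.ofList acc)).2.length : Int)
    = c + gcount acc l := by
  induction l generalizing c acc with
  | nil => simp [gcount]
  | cons s rest ih =>
    by_cases hs : s = ""
    · subst hs
      have h0 : (PySem.Set.empty : PySem.Set Char) = PySem.Set.ofList [] := rfl
      simp only [h0] at ih
      simp only [List.foldl_cons, h0, gcount, if_true]
      rw [ih]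
      ring
    · simp only [List.foldl_cons, gcount, if_neg hs, foldl_add_eq_ofList_append]
      exact ih c (acc ++ s.toList)

lemma gcount_mem (rest : List String) (h : ("" : String) ∈ rest) (acc : List Char) :
    gcount acc rest
      = ((PySem.Set.ofList (acc ++ (rest.take (rest.idxOf "")).flatMap String.toList)).length : Int)
        + gcount [] (rest.drop (rest.idxOf "" + 1)) := by
  induction rest generalizing acc with
  | nil => cases h
  | cons s rest ih =>
    by_cases hs : s = ""
    · subst hs
      simp [gcount, List.idxOf_cons_self]
    · have hm : ("" : String) ∈ rest := by
        cases h with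
        | head => exact absurd rfl hs
        | tail _ h => exact h
      have hidx : (s :: rest).idxOf "" = rest.idxOf "" + 1 := by
        simp [hs]
      rw [gcount, if_neg hs, ih hm, hidx]
      simp [List.append_assoc]
  
lemma gcount_not_mem (rest : List String) (h : ("" : String) ∉ rest) (acc : List Char) :
    gcount acc rest
      = ((PySem.Set.ofList (acc ++ rest.flatMap String.toList)).length : Int) := by
  induction rest generalizing acc with
  | nil => simp [gcount]
  | cons s rest ih =>
    have hs : s ≠ "" := fun hc => h (hc ▸ List.mem_cons_self ..)
    have hm : ("" : String) ∉ rest := fun hc => h (List.mem_cons_of_mem _ hc)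
    rw [gcount, if_neg hs, ih hm]
    simp [List.append_assoc]

lemma altGo_eq (rest : List String) (total : Int) :
    soln1AltGo total rest = total + gcount [] rest := by
  by_cases h : ("" : String) ∈ rest
  · rw [soln1AltGo, dif_pos h]
    have hlt := List.idxOf_lt_length_of_mem h
    have : (rest.drop (rest.idxOf "" + 1)).length < rest.length := by
      simp [List.length_drop]; omega
    rw [altGo_eq (rest.drop (rest.idxOf "" + 1)), gcount_mem rest h]
    simp [add_assoc]
  · rw [soln1AltGo, dif_neg h, gcount_not_mem rest h]
    simp
termination_by rest.length
decreasing_by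
  have := List.idxOf_lt_length_of_mem h
  simp [List.length_drop]
  omega

-- ===== VERDICT (by name: the statement is the Claim_ definition above) =====
theorem soln1_spec : Claim_equal_soln1 := by
  intro surveys _
  show soln1 surveys = soln1_alt surveys
  unfold soln1 soln1_alt
  have h0 : (PySem.Set.empty : PySem.Set Char) = PySem.Set.ofList [] := rfl
  rw [altGo_eq]
  simpa [h0] using foldA surveys 0 []
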